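-- pv_equiv track=rewrite | github.com/yisding/sentencesplit | analysis/analyze_disagreements_v1.py | check_parenthesis_balance
-- ===== SOURCE A (Python) =====
-- def check_parenthesis_balance(sents: list[str]) -> list[int]:
--     """Return indices where splits occur inside unclosed parentheses."""
--     bad = []
--     depth = 0
--     for i, s in enumerate(sents):
--         if depth > 0:
--             bad.append(i)
--         depth += s.count("(") - s.count(")")
--     return bad
-- ===== SOURCE B (Python) =====
-- def check_parenthesis_balance(sents: list[str]) -> list[int]:
--     """Return indices where splits occur inside unclosed parentheses."""
--     deltas = [s.count("(") - s.count(")") for s in sents]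
--     prefix = [0]
--     for d in deltas:
--         prefix.append(prefix[-1] + d)
--     return [i for i, e in enumerate(prefix[:len(sents)]) if e > 0]
-- ===== Notes on version B (the rewrite author's own statement) =====
-- stated objective: alternative
-- what changed: Replaces the single stateful loop that appends while mutating a depth counter by three passes: map to per-sentence paren deltas, build the entry-depth prefix-sum table, then a comprehension collecting indices with positive entry depth.
import Mathlib
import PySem

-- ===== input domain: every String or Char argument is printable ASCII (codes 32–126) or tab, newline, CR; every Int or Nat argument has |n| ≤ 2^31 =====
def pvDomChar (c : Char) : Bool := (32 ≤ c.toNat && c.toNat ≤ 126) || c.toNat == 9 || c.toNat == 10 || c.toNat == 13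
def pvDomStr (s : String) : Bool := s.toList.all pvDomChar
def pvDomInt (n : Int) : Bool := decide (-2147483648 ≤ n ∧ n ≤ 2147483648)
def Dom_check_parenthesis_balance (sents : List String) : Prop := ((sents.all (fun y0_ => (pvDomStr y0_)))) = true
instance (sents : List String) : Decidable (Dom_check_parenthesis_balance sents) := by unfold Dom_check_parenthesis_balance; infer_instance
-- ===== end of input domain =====

-- B replaces A's single stateful accumulating loop by three passes (delta map, prefix-sum entry table, filtering comprehension); same cost, alternative decomposition.


-- ===== PORT A =====
def check_parenthesis_balance (sents : List String) : List Int :=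
  ((PySem.List.enumerate sents 0).foldl
    (fun (st : List Int × Int) (p : Int × String) =>
      ((if st.2 > 0 then st.1 ++ [p.1] else st.1),
       st.2 + ((PySem.Str.count p.2 "(" : Int) - (PySem.Str.count p.2 ")" : Int))))
    ([], 0)).1

-- ===== PORT B =====
def check_parenthesis_balance_alt (sents : List String) : List Int :=
  let deltas := sents.map (fun s => ((PySem.Str.count s "(" : Int) - (PySem.Str.count s ")" : Int)))
  let prefixL := deltas.foldl (fun acc d => acc ++ [acc.getLastD 0 + d]) [(0 : Int)]
  (PySem.List.enumerate (prefixL.take sents.length) 0).filterMap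
    (fun p => if p.2 > 0 then some p.1 else none)

-- ===== PRECONDITION & SPEC =====
def Spec_check_parenthesis_balance (sents : List String) (out : List Int) : Prop := out = check_parenthesis_balance_alt sents
instance (sents : List String) (out : List Int) : Decidable (Spec_check_parenthesis_balance sents out) := by unfold Spec_check_parenthesis_balance; infer_instance

-- ===== CLAIM (what is proved, stated in full; the proofs are below) =====
def Claim_equal_check_parenthesis_balance : Prop := ∀ (sents : List String), Dom_check_parenthesis_balance sents → Spec_check_parenthesis_balance sents (check_parenthesis_balance sents)

-- ===== LEMMAS AND PROOFS =====

/-- Per-sentence parenthesis delta. -/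
def pvDelta (s : String) : Int := (PySem.Str.count s "(" : Int) - (PySem.Str.count s ")" : Int)

lemma pvDelta_eq (s : String) :
    pvDelta s = (PySem.Str.count s "(" : Int) - (PySem.Str.count s ")" : Int) := rfl

/-- Reference recursion: indices ≥ i whose entry depth (starting at `depth`) is positive. -/
def pvRef (i depth : Int) : List String → List Int
  | [] => []
  | s :: rest => (if depth > 0 then [i] else []) ++ pvRef (i + 1) (depth + pvDelta s) rest

/-- Entry-depth table starting at `c`. -/
def pvEntries (c : Int) : List String → List Int
  | [] => []
  | s :: rest => c :: pvEntries (c + pvDelta s) rest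

/-- Tail of the prefix-sum scan. -/
def pvScan (c : Int) : List Int → List Int
  | [] => []
  | d :: ds => (c + d) :: pvScan (c + d) ds

lemma pvRef_A : ∀ (xs : List String) (i depth : Int) (bad : List Int),
    ((PySem.List.enumerate xs i).foldl
      (fun (st : List Int × Int) (p : Int × String) =>
        ((if st.2 > 0 then st.1 ++ [p.1] else st.1), st.2 + pvDelta p.2))
      (bad, depth)).1 = bad ++ pvRef i depth xs := by
  intro xs
  induction xs with
  | nil => intro i depth bad; simp [PySem.List.enumerate_nil, pvRef]
  | cons s rest ih =>
    intro i depth bad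
    simp only [PySem.List.enumerate_cons, List.foldl_cons, pvRef]
    rw [ih]
    by_cases h : depth > 0 <;> simp [h]

lemma pvScan_foldl : ∀ (ds : List Int) (acc : List Int), acc ≠ [] →
    ds.foldl (fun acc d => acc ++ [acc.getLastD 0 + d]) acc = acc ++ pvScan (acc.getLastD 0) ds := by
  intro ds
  induction ds with
  | nil => intro acc _; simp [pvScan]
  | cons d ds ih =>
    intro acc hacc
    simp only [List.foldl_cons, pvScan]
    rw [ih (acc ++ [acc.getLastD 0 + d]) (by simp)]
    simp

lemma pvEntries_scan : ∀ (xs : List String) (c : Int),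
    (c :: pvScan c (xs.map pvDelta)).take xs.length = pvEntries c xs := by
  intro xs
  induction xs with
  | nil => intro c; simp [pvEntries]
  | cons s rest ih =>
    intro c
    simp only [List.map_cons, pvScan, pvEntries, List.length_cons, List.take_succ_cons]
    exact congrArg _ (ih (c + pvDelta s))

lemma pvRef_B : ∀ (xs : List String) (i c : Int),
    (PySem.List.enumerate (pvEntries c xs) i).filterMap
      (fun p => if p.2 > 0 then some p.1 else none) = pvRef i c xs := by
  intro xs
  induction xs with
  | nil => intro i c; simp [pvEntries, PySem.List.enumerate_nil, pvRef]
  | cons s rest ih =>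
    intro i c
    simp only [pvEntries, PySem.List.enumerate_cons, List.filterMap_cons, pvRef]
    by_cases h : c > 0 <;> simp [h, ih]

-- ===== VERDICT (by name: the statement is the Claim_ definition above) =====
theorem check_parenthesis_balance_spec : Claim_equal_check_parenthesis_balance := by
  intro sents _
  show check_parenthesis_balance sents = check_parenthesis_balance_alt sents
  unfold check_parenthesis_balance check_parenthesis_balance_alt
  simp only [← pvDelta_eq]
  rw [pvRef_A sents 0 0 [], List.nil_append,
    pvScan_foldl (sents.map pvDelta) [0] (by simp)]
  rw [show (([(0:Int)].getLastD 0)) = 0 from rfl]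
  rw [show (([(0:Int)] ++ pvScan 0 (sents.map pvDelta)) : List Int)
        = 0 :: pvScan 0 (sents.map pvDelta) from rfl]
  rw [pvEntries_scan sents 0, pvRef_B]
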